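-- pv_equiv track=rewrite | github.com/Franna88/medwave | analyze_unassigned_opportunities.py | extract_utm_data
-- ===== SOURCE A (Python) =====
-- def extract_h_ad_id_from_attributions(opportunity):
--     """Extract h_ad_id from opportunity attributions."""
--     attributions = opportunity.get('attributions', [])
--
--     for attr in reversed(attributions):
--         # Check various possible fields
--         for field in ['h_ad_id', 'utmAdId', 'adId']:
--             if attr.get(field):
--                 return attr[field]
--
--     return None
--
-- def extract_utm_data(opportunity):
--     """Extract all UTM data from opportunity."""
--     attributions = opportunity.get('attributions', [])
--
--     utm_data = {
--         'h_ad_id': None,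
--         'utmCampaignId': None,
--         'utmCampaign': None,
--         'utmMedium': None,
--         'utmSource': None
--     }
--
--     for attr in reversed(attributions):
--         if not utm_data['h_ad_id']:
--             utm_data['h_ad_id'] = extract_h_ad_id_from_attributions(opportunity)
--         if not utm_data['utmCampaignId'] and attr.get('utmCampaignId'):
--             utm_data['utmCampaignId'] = attr.get('utmCampaignId')
--         if not utm_data['utmCampaign'] and attr.get('utmCampaign'):
--             utm_data['utmCampaign'] = attr.get('utmCampaign')
--         if not utm_data['utmMedium'] and attr.get('utmMedium'):
--             utm_data['utmMedium'] = attr.get('utmMedium')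
--         if not utm_data['utmSource'] and attr.get('utmSource'):
--             utm_data['utmSource'] = attr.get('utmSource')
--
--     return utm_data
-- ===== SOURCE B (Python) =====
-- def extract_utm_data(opportunity):
--     """Extract all UTM data from opportunity."""
--     attributions = opportunity.get('attributions', [])
--
--     def first(field):
--         return next((a[field] for a in reversed(attributions) if a.get(field)), None)
--
--     return {
--         'h_ad_id': next((a[f] for a in reversed(attributions)
--                          for f in ('h_ad_id', 'utmAdId', 'adId') if a.get(f)), None),
--         'utmCampaignId': first('utmCampaignId'),
--         'utmCampaign': first('utmCampaign'),
--         'utmMedium': first('utmMedium'),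
--         'utmSource': first('utmSource'),
--     }
-- ===== Notes on version B (the rewrite author's own statement) =====
-- stated objective: alternative
-- what changed: A's single fused loop over a mutable five-key dict with guard flags (re-calling the whole h_ad_id rescan helper on every iteration while that flag is unset) is replaced by one independent reverse search per field: a next()-over-generator scan for each UTM field and a flattened nested-generator candidates scan for h_ad_id, with the result dict assembled directly.
import Mathlib
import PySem

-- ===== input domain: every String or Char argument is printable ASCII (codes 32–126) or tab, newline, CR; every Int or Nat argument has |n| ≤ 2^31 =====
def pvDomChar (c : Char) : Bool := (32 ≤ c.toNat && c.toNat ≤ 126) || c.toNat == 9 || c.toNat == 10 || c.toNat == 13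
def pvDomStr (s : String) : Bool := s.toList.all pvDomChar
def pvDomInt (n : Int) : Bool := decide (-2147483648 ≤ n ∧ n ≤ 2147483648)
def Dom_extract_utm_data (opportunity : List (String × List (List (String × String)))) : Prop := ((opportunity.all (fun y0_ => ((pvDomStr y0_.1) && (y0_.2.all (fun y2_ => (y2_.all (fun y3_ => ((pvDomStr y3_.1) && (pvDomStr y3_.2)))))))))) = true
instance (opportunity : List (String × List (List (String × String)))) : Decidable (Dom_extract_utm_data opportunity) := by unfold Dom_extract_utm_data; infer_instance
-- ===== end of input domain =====

-- B replaces A's single guarded-accumulator loop over a mutable dict by one independent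
-- reverse search per field (objective: alternative decomposition, similar cost).

-- shared primitive: Python `d.get(k)` on a possibly duplicate-keyed association list = first match
def pvGet (attr : List (String × String)) (f : String) : Option String :=
  (attr.find? (fun kv => kv.1 == f)).map (·.2)

-- Python truthiness of a `str | None` value: None and "" are falsy
def pvTruthy (o : Option String) : Bool := o.getD "" != ""

-- ===== PORT A =====
-- inner `for field in [...]`: returns attr[field] on the first truthy attr.get(field)
-- (the guard guarantees the key is present, so returning `pvGet attr f` itself is exact)
def pvAFields (attr : List (String × String)) : List String → Option String
  | [] => none
  | f :: fs => if pvTruthy (pvGet attr f) then pvGet attr f else pvAFields attr fs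

def pvALoop : List (List (String × String)) → Option String
  | [] => none
  | attr :: rest =>
    match pvAFields attr ["h_ad_id", "utmAdId", "adId"] with
    | some v => some v
    | none => pvALoop rest

def extract_h_ad_id_from_attributions (opportunity : List (String × List (List (String × String)))) : Option String :=
  let attributions := ((opportunity.find? (fun kv => kv.1 == "attributions")).map (·.2)).getD []
  pvALoop attributions.reverse

-- the body of A's `for attr in reversed(attributions)` loop, line for line
-- (`utm_data[k]` indexing: every key is always present, so getD _ none is exact)
def pvAStep (opportunity : List (String × List (List (String × String))))
    (utm : PySem.Dict String (Option String)) (attr : List (String × String)) :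
    PySem.Dict String (Option String) :=
  let utm := if !pvTruthy (utm.getD "h_ad_id" none) then
               utm.insert "h_ad_id" (extract_h_ad_id_from_attributions opportunity) else utm
  let utm := if !pvTruthy (utm.getD "utmCampaignId" none) && pvTruthy (pvGet attr "utmCampaignId") then
               utm.insert "utmCampaignId" (pvGet attr "utmCampaignId") else utm
  let utm := if !pvTruthy (utm.getD "utmCampaign" none) && pvTruthy (pvGet attr "utmCampaign") then
               utm.insert "utmCampaign" (pvGet attr "utmCampaign") else utm
  let utm := if !pvTruthy (utm.getD "utmMedium" none) && pvTruthy (pvGet attr "utmMedium") then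
               utm.insert "utmMedium" (pvGet attr "utmMedium") else utm
  let utm := if !pvTruthy (utm.getD "utmSource" none) && pvTruthy (pvGet attr "utmSource") then
               utm.insert "utmSource" (pvGet attr "utmSource") else utm
  utm

def extract_utm_data (opportunity : List (String × List (List (String × String)))) : List (String × Option String) :=
  let attributions := ((opportunity.find? (fun kv => kv.1 == "attributions")).map (·.2)).getD []
  let utm0 : PySem.Dict String (Option String) :=
    PySem.Dict.mk [("h_ad_id", none), ("utmCampaignId", none), ("utmCampaign", none),
                   ("utmMedium", none), ("utmSource", none)]
  (attributions.reverse.foldl (pvAStep opportunity) utm0).items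

-- ===== PORT B =====
-- `next((a[field] for a in reversed(attributions) if a.get(field)), None)`
def pvBFirst (attributions : List (List (String × String))) (field : String) : Option String :=
  (attributions.reverse.find? (fun a => pvTruthy (pvGet a field))).bind (fun a => pvGet a field)

-- `next((a[f] for a in reversed(attributions) for f in (...) if a.get(f)), None)`
def pvBHAdId (attributions : List (List (String × String))) : Option String :=
  (attributions.reverse.flatMap (fun a =>
    ["h_ad_id", "utmAdId", "adId"].filterMap (fun f =>
      if pvTruthy (pvGet a f) then pvGet a f else none))).head?

def extract_utm_data_alt (opportunity : List (String × List (List (String × String)))) : List (String × Option String) :=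
  let attributions := ((opportunity.find? (fun kv => kv.1 == "attributions")).map (·.2)).getD []
  [("h_ad_id", pvBHAdId attributions),
   ("utmCampaignId", pvBFirst attributions "utmCampaignId"),
   ("utmCampaign", pvBFirst attributions "utmCampaign"),
   ("utmMedium", pvBFirst attributions "utmMedium"),
   ("utmSource", pvBFirst attributions "utmSource")]

-- ===== PRECONDITION & SPEC =====
def Spec_extract_utm_data (opportunity : List (String × List (List (String × String)))) (out : List (String × Option String)) : Prop := out = extract_utm_data_alt opportunity
instance (opportunity : List (String × List (List (String × String)))) (out : List (String × Option String)) : Decidable (Spec_extract_utm_data opportunity out) := by unfold Spec_extract_utm_data; infer_instance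

-- ===== CLAIM (what is proved, stated in full; the proofs are below) =====
def Claim_equal_extract_utm_data : Prop := ∀ (opportunity : List (String × List (List (String × String)))), Dom_extract_utm_data opportunity → Spec_extract_utm_data opportunity (extract_utm_data opportunity)

-- ===== LEMMAS AND PROOFS =====

-- first truthy value of field f scanning l from the front
def pvSel (f : String) : List (List (String × String)) → Option String
  | [] => none
  | x :: xs => if pvTruthy (pvGet x f) then pvGet x f else pvSel f xs

-- closed form of one field accumulator after folding over l
def pvCF (f : String) (l : List (List (String × String))) (b : Option String) : Option String :=
  if pvTruthy b then b else (pvSel f l).elim b some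

-- closed form of the h_ad_id accumulator after folding over l (H the constant rescan value)
def pvHF (l : List (List (String × String))) (a H : Option String) : Option String :=
  if pvTruthy a then a else if l = [] then a else H

theorem pvTruthy_iff {o : Option String} :
    pvTruthy o = true ↔ ∃ v, o = some v ∧ v ≠ "" := by
  cases o <;> simp [pvTruthy]

theorem pvAFields_eq (attr : List (String × String)) (fs : List String) :
    pvAFields attr fs =
      (fs.filterMap (fun f => if pvTruthy (pvGet attr f) then pvGet attr f else none)).head? := by
  induction fs with
  | nil => rfl
  | cons f fs ih =>
    by_cases h : pvTruthy (pvGet attr f) = true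
    · obtain ⟨v, hv, hne⟩ := pvTruthy_iff.mp h
      simp [pvAFields, hv, hne, pvTruthy]
    · simp at h
      simp [pvAFields, h, ih]

theorem pvALoop_eq (l : List (List (String × String))) :
    pvALoop l = (l.flatMap (fun a =>
      ["h_ad_id", "utmAdId", "adId"].filterMap (fun f =>
        if pvTruthy (pvGet a f) then pvGet a f else none))).head? := by
  induction l with
  | nil => rfl
  | cons x xs ih =>
    rw [List.flatMap_cons, pvALoop, pvAFields_eq]
    cases h : (["h_ad_id", "utmAdId", "adId"].filterMap (fun f =>
        if pvTruthy (pvGet x f) then pvGet x f else none)) with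
    | nil => simpa using ih
    | cons y ys => simp

theorem pvBFirst_eq (l : List (List (String × String))) (f : String) :
    (l.find? (fun a => pvTruthy (pvGet a f))).bind (fun a => pvGet a f) = pvSel f l := by
  induction l with
  | nil => rfl
  | cons x xs ih =>
    by_cases h : pvTruthy (pvGet x f) = true
    · simp [h, pvSel]
    · simp at h
      simp [h, pvSel, ih]

theorem pvCF_step (f : String) (x : List (String × String))
    (xs : List (List (String × String))) (b : Option String) :
    pvCF f xs (if !pvTruthy b && pvTruthy (pvGet x f) then pvGet x f else b) =
      pvCF f (x :: xs) b := by
  by_cases hb : pvTruthy b = true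
  · simp [pvCF, hb]
  · simp at hb
    by_cases hg : pvTruthy (pvGet x f) = true
    · obtain ⟨v, hv, hne⟩ := pvTruthy_iff.mp hg
      have hb' : b.getD "" = "" := by simpa [pvTruthy] using hb
      simp [pvCF, pvSel, hv, hne, pvTruthy, hb']
    · simp at hg
      simp [pvCF, pvSel, hb, hg]

theorem pvHF_step (x : List (String × String)) (xs : List (List (String × String)))
    (a H : Option String) :
    pvHF xs (if !pvTruthy a then H else a) H = pvHF (x :: xs) a H := by
  by_cases ha : pvTruthy a = true
  · simp [pvHF, ha]
  · simp at ha
    by_cases hH : pvTruthy H = true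
    · simp [pvHF, ha, hH]
    · simp at hH
      simp [pvHF, ha, hH]

def pvMkD (a b c d e : Option String) : PySem.Dict String (Option String) :=
  PySem.Dict.mk [("h_ad_id", a), ("utmCampaignId", b), ("utmCampaign", c),
    ("utmMedium", d), ("utmSource", e)]

theorem pvGetD1 (a b c d e : Option String) : (pvMkD a b c d e).getD "h_ad_id" none = a := by
  simp [pvMkD, PySem.Dict.getD, PySem.Dict.get?]
theorem pvGetD2 (a b c d e : Option String) : (pvMkD a b c d e).getD "utmCampaignId" none = b := by
  simp [pvMkD, PySem.Dict.getD, PySem.Dict.get?]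
theorem pvGetD3 (a b c d e : Option String) : (pvMkD a b c d e).getD "utmCampaign" none = c := by
  simp [pvMkD, PySem.Dict.getD, PySem.Dict.get?]
theorem pvGetD4 (a b c d e : Option String) : (pvMkD a b c d e).getD "utmMedium" none = d := by
  simp [pvMkD, PySem.Dict.getD, PySem.Dict.get?]
theorem pvGetD5 (a b c d e : Option String) : (pvMkD a b c d e).getD "utmSource" none = e := by
  simp [pvMkD, PySem.Dict.getD, PySem.Dict.get?]

theorem pvIns1 (t : Bool) (v a b c d e : Option String) :
    (if t then (pvMkD a b c d e).insert "h_ad_id" v else pvMkD a b c d e) =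
      pvMkD (if t then v else a) b c d e := by
  cases t <;> simp [pvMkD, PySem.Dict.insert, PySem.Dict.contains]
theorem pvIns2 (t : Bool) (v a b c d e : Option String) :
    (if t then (pvMkD a b c d e).insert "utmCampaignId" v else pvMkD a b c d e) =
      pvMkD a (if t then v else b) c d e := by
  cases t <;> simp [pvMkD, PySem.Dict.insert, PySem.Dict.contains]
theorem pvIns3 (t : Bool) (v a b c d e : Option String) :
    (if t then (pvMkD a b c d e).insert "utmCampaign" v else pvMkD a b c d e) =
      pvMkD a b (if t then v else c) d e := by
  cases t <;> simp [pvMkD, PySem.Dict.insert, PySem.Dict.contains]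
theorem pvIns4 (t : Bool) (v a b c d e : Option String) :
    (if t then (pvMkD a b c d e).insert "utmMedium" v else pvMkD a b c d e) =
      pvMkD a b c (if t then v else d) e := by
  cases t <;> simp [pvMkD, PySem.Dict.insert, PySem.Dict.contains]
theorem pvIns5 (t : Bool) (v a b c d e : Option String) :
    (if t then (pvMkD a b c d e).insert "utmSource" v else pvMkD a b c d e) =
      pvMkD a b c d (if t then v else e) := by
  cases t <;> simp [pvMkD, PySem.Dict.insert, PySem.Dict.contains]

theorem pvAStep_mk (opportunity : List (String × List (List (String × String))))
    (attr : List (String × String)) (a b c d e : Option String) :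
    pvAStep opportunity (pvMkD a b c d e) attr =
      pvMkD (if !pvTruthy a then extract_h_ad_id_from_attributions opportunity else a)
        (if !pvTruthy b && pvTruthy (pvGet attr "utmCampaignId") then pvGet attr "utmCampaignId" else b)
        (if !pvTruthy c && pvTruthy (pvGet attr "utmCampaign") then pvGet attr "utmCampaign" else c)
        (if !pvTruthy d && pvTruthy (pvGet attr "utmMedium") then pvGet attr "utmMedium" else d)
        (if !pvTruthy e && pvTruthy (pvGet attr "utmSource") then pvGet attr "utmSource" else e) := by
  unfold pvAStep
  simp only [pvGetD1, pvIns1, pvGetD2, pvIns2, pvGetD3, pvIns3, pvGetD4, pvIns4, pvGetD5, pvIns5]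

theorem pvFold_eq (opportunity : List (String × List (List (String × String))))
    (l : List (List (String × String))) (a b c d e : Option String) :
    l.foldl (pvAStep opportunity) (pvMkD a b c d e) =
      pvMkD (pvHF l a (extract_h_ad_id_from_attributions opportunity))
        (pvCF "utmCampaignId" l b) (pvCF "utmCampaign" l c)
        (pvCF "utmMedium" l d) (pvCF "utmSource" l e) := by
  induction l generalizing a b c d e with
  | nil => simp [pvHF, pvCF, pvSel, ite_self]
  | cons x xs ih =>
    rw [List.foldl_cons, pvAStep_mk, ih, pvHF_step x, pvCF_step, pvCF_step, pvCF_step, pvCF_step]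

theorem pvHF_none (l : List (List (String × String))) :
    pvHF l.reverse none (pvALoop l.reverse) = pvBHAdId l := by
  rw [pvBHAdId, ← pvALoop_eq]
  cases h : l.reverse with
  | nil => simp [pvHF, pvALoop, pvTruthy]
  | cons y ys => simp [pvHF, pvTruthy]

theorem pvCF_none (f : String) (l : List (List (String × String))) :
    pvCF f l.reverse none = pvBFirst l f := by
  rw [pvBFirst, pvBFirst_eq, pvCF]
  cases pvSel f l.reverse <;> simp [pvTruthy]

-- ===== VERDICT (by name: the statement is the Claim_ definition above) =====
theorem extract_utm_data_spec : Claim_equal_extract_utm_data := by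
  intro opportunity _
  unfold Spec_extract_utm_data
  show (List.foldl (pvAStep opportunity) (pvMkD none none none none none)
      (((opportunity.find? (fun kv => kv.1 == "attributions")).map (·.2)).getD []).reverse).items
    = extract_utm_data_alt opportunity
  rw [pvFold_eq,
    show extract_h_ad_id_from_attributions opportunity =
      pvALoop (((opportunity.find? (fun kv => kv.1 == "attributions")).map (·.2)).getD []).reverse
    from rfl,
    pvHF_none, pvCF_none, pvCF_none, pvCF_none, pvCF_none]
  rfl
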